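-- pv_equiv track=rewrite | github.com/antonyfigueirasimoes/conecta4 | juego_functions.py | victoria_horizontal_fila
-- ===== SOURCE A (Python) =====
-- def victoria_horizontal_fila(tablero,pos_fila,ficha):
--   contador_iguales = 0
--   res = False
--
--   for columna in tablero:
--     if columna[pos_fila] == ficha:
--       contador_iguales += 1
--     else:
--       contador_iguales = 0
--
--     if contador_iguales == 4:
--       return True
--
--   return False
--
--   '''
--  -
--   '''
-- ===== SOURCE B (Python) =====
-- def victoria_horizontal_fila(tablero, pos_fila, ficha):
--     vals = [columna[pos_fila] == ficha for columna in tablero]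
--     return any(a and b and c and d
--                for a, b, c, d in zip(vals, vals[1:], vals[2:], vals[3:]))
-- ===== Notes on version B (the rewrite author's own statement) =====
-- stated objective: idiomatic
-- what changed: Replaces the stateful running-streak counter with a stateless window check: map each column to a boolean hit list and use any over zip of the list with its three shifted copies.
-- outside the precondition, e.g. on victoria_horizontal_fila([[1], [1], [1], [1], []], 0, 1): A returns True, B raises IndexError
import Mathlib
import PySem

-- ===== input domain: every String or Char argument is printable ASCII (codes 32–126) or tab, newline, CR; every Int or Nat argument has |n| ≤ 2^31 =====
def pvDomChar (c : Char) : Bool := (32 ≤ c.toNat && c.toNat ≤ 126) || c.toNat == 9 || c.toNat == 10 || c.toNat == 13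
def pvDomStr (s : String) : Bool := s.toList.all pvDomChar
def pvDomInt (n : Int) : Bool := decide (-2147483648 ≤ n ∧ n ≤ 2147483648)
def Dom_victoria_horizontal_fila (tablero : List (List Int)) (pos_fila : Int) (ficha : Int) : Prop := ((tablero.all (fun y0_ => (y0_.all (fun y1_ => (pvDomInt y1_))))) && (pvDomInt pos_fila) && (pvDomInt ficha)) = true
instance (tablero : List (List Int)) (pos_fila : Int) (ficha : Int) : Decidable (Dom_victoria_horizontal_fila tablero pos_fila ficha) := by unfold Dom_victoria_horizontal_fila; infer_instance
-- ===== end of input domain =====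

-- B replaces A's running-streak counter with a stateless any-over-zip window check (idiomatic; same O(n) cost).

-- ===== PORT A =====
-- A's for-loop with the streak counter and early return, as structural recursion over tablero.
-- columna[pos_fila] is PySem.List.pyGet? (exact, incl. negative indices); out-of-range (Python
-- IndexError) is excluded by Pre_ below, there the test is just false here.
def pvGoA (pos_fila ficha : Int) : List (List Int) → Nat → Bool
  | [], _ => false
  | columna :: rest, contador_iguales =>
      let c' := if PySem.List.pyGet? columna pos_fila = some ficha then contador_iguales + 1 else 0
      if c' = 4 then true else pvGoA pos_fila ficha rest c'

def victoria_horizontal_fila (tablero : List (List Int)) (pos_fila : Int) (ficha : Int) : Bool :=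
  pvGoA pos_fila ficha tablero 0

-- ===== PORT B =====
-- Source B: vals = [columna[pos_fila] == ficha for columna in tablero];
--       any(a and b and c and d for a,b,c,d in zip(vals, vals[1:], vals[2:], vals[3:]))
-- vals[k:] with nonnegative k is List.drop k (exact).
def victoria_horizontal_fila_alt (tablero : List (List Int)) (pos_fila : Int) (ficha : Int) : Bool :=
  let vals := tablero.map (fun columna => decide (PySem.List.pyGet? columna pos_fila = some ficha))
  (((vals.zip (vals.drop 1)).zip ((vals.drop 2).zip (vals.drop 3))).any
    (fun q => q.1.1 && q.1.2 && q.2.1 && q.2.2))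

-- ===== PRECONDITION & SPEC =====
-- Pre_ excludes boards in which pos_fila is out of range for some column: there Python A raises
-- IndexError, except that A may still return True when four-in-a-row completes before reaching the
-- short column, while B indexes every column and always raises.
def Pre_victoria_horizontal_fila (tablero : List (List Int)) (pos_fila : Int) (ficha : Int) : Prop :=
  ∀ columna ∈ tablero, PySem.Raise.InRange columna.length pos_fila
instance (tablero : List (List Int)) (pos_fila : Int) (ficha : Int) : Decidable (Pre_victoria_horizontal_fila tablero pos_fila ficha) := by unfold Pre_victoria_horizontal_fila; infer_instance

def pvWitness_victoria_horizontal_fila : List (List Int) × Int × Int := ([[1], [1], [2], [1], [1], [1], [1]], 0, 1)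

def Spec_victoria_horizontal_fila (tablero : List (List Int)) (pos_fila : Int) (ficha : Int) (out : Bool) : Prop := out = victoria_horizontal_fila_alt tablero pos_fila ficha
instance (tablero : List (List Int)) (pos_fila : Int) (ficha : Int) (out : Bool) : Decidable (Spec_victoria_horizontal_fila tablero pos_fila ficha out) := by unfold Spec_victoria_horizontal_fila; infer_instance

-- ===== CLAIM (what is proved, stated in full; the proofs are below) =====
def Claim_equal_victoria_horizontal_fila : Prop := ∀ (tablero : List (List Int)) (pos_fila : Int) (ficha : Int), Dom_victoria_horizontal_fila tablero pos_fila ficha → Pre_victoria_horizontal_fila tablero pos_fila ficha → Spec_victoria_horizontal_fila tablero pos_fila ficha (victoria_horizontal_fila tablero pos_fila ficha)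

-- ===== LEMMAS AND PROOFS =====

-- Abstract versions over the boolean hit list.
def pvPre (l : List Bool) (k : Nat) : Bool := decide (k ≤ l.length) && (l.take k).all id

def pvStreak : List Bool → Nat → Bool
  | [], _ => false
  | b :: rest, cnt =>
      let c' := if b then cnt + 1 else 0
      if c' = 4 then true else pvStreak rest c'

def pvWin4 : List Bool → Bool
  | [] => false
  | b :: rest => pvPre (b :: rest) 4 || pvWin4 rest

theorem pvPre_mono (l : List Bool) (j k : Nat) (h : j ≤ k) (hk : pvPre l k = true) : pvPre l j = true := by
  simp only [pvPre, Bool.and_eq_true, decide_eq_true_eq, List.all_eq_true] at *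
  refine ⟨le_trans h hk.1, fun b hb => hk.2 b ?_⟩
  have : l.take j = (l.take k).take j := by
    rw [List.take_take, Nat.min_eq_left h]
  exact List.take_subset _ _ (this ▸ hb)

theorem pvWin4_absorb (l : List Bool) : (pvPre l 4 || pvWin4 l) = pvWin4 l := by
  cases l with
  | nil => simp [pvPre, pvWin4]
  | cons b rest =>
      simp only [pvWin4]
      cases pvPre (b :: rest) 4 <;> simp

theorem pvStreak_eq (l : List Bool) : ∀ cnt : Nat, cnt < 4 →
    pvStreak l cnt = (pvPre l (4 - cnt) || pvWin4 l) := by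
  induction l with
  | nil =>
      intro cnt hcnt
      have : 4 - cnt ≠ 0 := by omega
      simp [pvStreak, pvWin4, pvPre]
      omega
  | cons b rest ih =>
      intro cnt hcnt
      cases b with
      | false =>
          have hL : pvStreak (false :: rest) cnt = pvStreak rest 0 := by
            simp [pvStreak]
          have hpre : pvPre (false :: rest) (4 - cnt) = false := by
            have : 4 - cnt ≠ 0 := by omega
            rcases Nat.exists_eq_succ_of_ne_zero this with ⟨k, hk⟩
            simp [pvPre, hk]
          have hW : pvWin4 (false :: rest) = pvWin4 rest := by
            have h4 : pvPre (false :: rest) 4 = false := by simp [pvPre]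
            simp [pvWin4, h4]
          rw [hL, ih 0 (by omega), hpre, hW, Nat.sub_zero, pvWin4_absorb, Bool.false_or]
      | true =>
          by_cases h4 : cnt + 1 = 4
          · have hcnt3 : cnt = 3 := by omega
            subst hcnt3
            have hp1 : pvPre (true :: rest) 1 = true := by simp [pvPre]
            simp [pvStreak, hp1]
          · have hlt : cnt + 1 < 4 := by omega
            have hL : pvStreak (true :: rest) cnt = pvStreak rest (cnt + 1) := by
              simp [pvStreak, h4]
            rw [hL, ih (cnt + 1) hlt]
            have hsub : 4 - cnt = (4 - (cnt + 1)) + 1 := by omega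
            have hpre : pvPre (true :: rest) (4 - cnt) = pvPre rest (4 - (cnt + 1)) := by
              rw [hsub]; simp [pvPre]
            have hW : pvWin4 (true :: rest) = (pvPre (true :: rest) 4 || pvWin4 rest) := by
              simp only [pvWin4]
            have hp4 : pvPre (true :: rest) 4 = pvPre rest 3 := by
              simp [pvPre]
            rw [hW, hpre, hp4]
            cases hr3 : pvPre rest 3 with
            | false => simp
            | true =>
                have h' : pvPre rest (3 - cnt) = true :=
                  pvPre_mono rest _ 3 (by omega) hr3
                simp [h']

theorem pvGoA_eq_streak (pos_fila ficha : Int) (tablero : List (List Int)) (cnt : Nat) :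
    pvGoA pos_fila ficha tablero cnt =
      pvStreak (tablero.map (fun columna => decide (PySem.List.pyGet? columna pos_fila = some ficha))) cnt := by
  induction tablero generalizing cnt with
  | nil => rfl
  | cons c rest ih =>
      simp only [pvGoA, List.map_cons, pvStreak]
      by_cases h : PySem.List.pyGet? c pos_fila = some ficha
      · simp only [h, decide_true, if_true]
        split <;> simp_all
      · simp only [h, decide_false, if_false]
        split <;> simp_all

theorem pvZip_eq_win4 (l : List Bool) :
    ((l.zip (l.drop 1)).zip ((l.drop 2).zip (l.drop 3))).any
      (fun q => q.1.1 && q.1.2 && q.2.1 && q.2.2) = pvWin4 l := by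
  induction l with
  | nil => rfl
  | cons a t ih =>
      cases t with
      | nil => simp [pvWin4, pvPre]
      | cons b t2 =>
          cases t2 with
          | nil => simp [pvWin4, pvPre]
          | cons c t3 =>
              cases t3 with
              | nil => simp [pvWin4, pvPre]
              | cons d t4 =>
                  simp only [List.drop_succ_cons, List.drop_zero, List.zip_cons_cons,
                    List.any_cons] at *
                  rw [ih]
                  have h1 : pvPre (a :: b :: c :: d :: t4) 4 = (a && b && c && d) := by
                    simp [pvPre, List.take_succ_cons, Bool.and_assoc]
                  have h2 : pvWin4 (a :: b :: c :: d :: t4)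
                      = (pvPre (a :: b :: c :: d :: t4) 4 || pvWin4 (b :: c :: d :: t4)) := by
                    simp only [pvWin4]
                  rw [h2, h1]

-- ===== VERDICT (by name: the statement is the Claim_ definition above) =====
theorem victoria_horizontal_fila_spec : Claim_equal_victoria_horizontal_fila := by
  intro tablero pos_fila ficha _ _
  unfold Spec_victoria_horizontal_fila victoria_horizontal_fila victoria_horizontal_fila_alt
  rw [pvGoA_eq_streak, pvZip_eq_win4, pvStreak_eq _ 0 (by decide), Nat.sub_zero, pvWin4_absorb]
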